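-- pv_equiv track=rewrite | github.com/priyanhsu10/ds-practice | python/Heap/Heap.py | insert_heap
-- ===== SOURCE A (Python) =====
-- import math
--
-- def insert_heap(h: list, number):
--     h.append(number)
--     l = len(h)-1
--     # compare with parent swap
--     p_index = math.floor(((l-1)/2))
--     while True:
--         if p_index < 0:
--             break
--
--         if h[p_index] < h[l]:
--             # swap
--             temp = h[p_index]
--             h[p_index] = h[l]
--             h[l] = temp
--             l = p_index
--             p_index = math.floor((l-1)/2)
--         else:
--             break
--
--     return h
-- ===== SOURCE B (Python) =====
-- def insert_heap(h: list, number):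
--     h.append(number)
--     # stage 1: materialize the ancestor chain of the last slot (parent, grandparent, ..., root)
--     chain = []
--     i = len(h) - 1
--     while i > 0:
--         i = (i - 1) // 2
--         chain.append(i)
--     # stage 2: count how many ancestors, from the bottom of the chain, are smaller than number
--     t = 0
--     while t < len(chain) and h[chain[t]] < number:
--         t += 1
--     # stage 3: shift those t ancestor values one step down along the chain, place number above them
--     dest = len(h) - 1
--     for a in chain[:t]:
--         h[dest] = h[a]
--         dest = a
--     h[dest] = number
--     return h
-- ===== Notes on version B (the rewrite author's own statement) =====
-- stated objective: alternative
-- what changed: Replaces A's single interleaved swap walk by three staged passes: it materializes the ancestor-index chain of the new slot as a list, then counts separately how many ancestors (from the bottom) are smaller than the new value, then shifts exactly those values one step down along the chain and writes the new value once.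
import Mathlib
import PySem

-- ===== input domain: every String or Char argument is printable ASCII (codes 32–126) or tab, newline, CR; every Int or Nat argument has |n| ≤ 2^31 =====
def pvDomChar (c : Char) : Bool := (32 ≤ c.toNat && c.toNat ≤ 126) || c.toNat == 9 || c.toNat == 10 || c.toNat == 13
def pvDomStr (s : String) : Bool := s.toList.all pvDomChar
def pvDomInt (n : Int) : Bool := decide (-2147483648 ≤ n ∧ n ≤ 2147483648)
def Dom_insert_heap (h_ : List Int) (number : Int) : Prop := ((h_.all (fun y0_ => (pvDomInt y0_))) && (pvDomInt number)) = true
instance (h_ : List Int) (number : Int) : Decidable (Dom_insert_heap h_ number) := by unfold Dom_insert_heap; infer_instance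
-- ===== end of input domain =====

-- B replaces A's interleaved swap walk by three staged passes (materialize the ancestor chain,
-- count the smaller ancestors, shift along the counted prefix); same return value; note both
-- Pythons mutate the argument list in place, the claim is about the return value.

-- ===== PORT A =====
-- A's while-loop: state is the list and the current index l; p_index = floor((l-1)/2).
-- (math.floor((l-1)/2) on these magnitudes is exactly floor division.)
def insertHeapLoopA (h : List Int) (l : Nat) : List Int :=
  let p : Int := PySem.Int.floordiv ((l : Int) - 1) 2
  if hp : p < 0 then h
  else
    match PySem.List.pyGet? h p, PySem.List.pyGet? h (l : Int) with
    | some a, some b =>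
      if a < b then
        -- swap h[p] and h[l], move up
        insertHeapLoopA ((h.set p.toNat b).set l a) p.toNat
      else h
    | _, _ => h  -- unreachable: both indices are in range whenever l < h.length
termination_by l
decreasing_by
  have e : p = ((l : Int) - 1) / 2 := PySem.Int.floordiv_eq_ediv_of_pos (by norm_num)
  omega

def insert_heap (h_ : List Int) (number : Int) : List Int :=
  let h := h_ ++ [number]
  insertHeapLoopA h (h.length - 1)

-- ===== PORT B =====
-- stage 1: the ancestor-index chain of slot i, bottom-up (parent, grandparent, …, root)
def chainIdx (i : Nat) : List Nat :=
  if h : 0 < i then ((i - 1) / 2) :: chainIdx ((i - 1) / 2) else []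
termination_by i
decreasing_by omega

-- stage 2: B's counting while-loop: the length of the prefix of chain values smaller than val
def cntSmaller (h : List Int) (cs : List Nat) (val : Int) : Nat :=
  match cs with
  | [] => 0
  | c :: rest =>
    match PySem.List.pyGet? h (c : Int) with
    | some v => if v < val then 1 + cntSmaller h rest val else 0
    | none => 0  -- unreachable: chain indices are < h.length

-- stage 3: B's for-loop over chain[:t] carrying dest; finally writes val at dest
def shiftDown (h : List Int) (dest : Nat) (cs : List Nat) (val : Int) : List Int :=
  match cs with
  | [] => h.set dest val
  | a :: rest =>
    match PySem.List.pyGet? h (a : Int) with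
    | some v => shiftDown (h.set dest v) a rest val
    | none => h  -- unreachable: chain indices are < h.length

def insert_heap_alt (h_ : List Int) (number : Int) : List Int :=
  let h := h_ ++ [number]
  let ch := chainIdx (h.length - 1)
  let t := cntSmaller h ch number
  shiftDown h (h.length - 1) (ch.take t) number

-- ===== PRECONDITION & SPEC =====
def Spec_insert_heap (h_ : List Int) (number : Int) (out : List Int) : Prop := out = insert_heap_alt h_ number
instance (h_ : List Int) (number : Int) (out : List Int) : Decidable (Spec_insert_heap h_ number out) := by unfold Spec_insert_heap; infer_instance

-- ===== CLAIM (what is proved, stated in full; the proofs are below) =====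
def Claim_equal_insert_heap : Prop := ∀ (h_ : List Int) (number : Int), Dom_insert_heap h_ number → Spec_insert_heap h_ number (insert_heap h_ number)

-- ===== LEMMAS AND PROOFS =====

lemma floordiv_pred_half (i : Nat) (hi : 0 < i) :
    PySem.Int.floordiv ((i : Int) - 1) 2 = (((i - 1) / 2 : Nat) : Int) := by
  have h1 : ((i : Int) - 1) = ((i - 1 : Nat) : Int) := by omega
  rw [h1]
  exact_mod_cast PySem.Int.floordiv_natCast (i - 1) 2

lemma chainIdx_lt (i : Nat) : ∀ a ∈ chainIdx i, a < i := by
  induction i using Nat.strong_induction_on with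
  | _ i IH =>
    intro a ha
    rw [chainIdx] at ha
    by_cases hi : 0 < i
    · rw [dif_pos hi] at ha
      rw [List.mem_cons] at ha
      rcases ha with ha | ha
      · omega
      · have := IH ((i - 1) / 2) (by omega) a ha
        omega
    · rw [dif_neg hi] at ha; simp at ha

lemma set_eq_self_of_get (h : List Int) (l : Nat) (val : Int) (hv : h[l]? = some val) :
    h.set l val = h := by
  obtain ⟨hlt, he⟩ := List.getElem?_eq_some_iff.mp hv
  rw [← he]
  exact List.set_getElem_self hlt

lemma cntSmaller_congr (g h : List Int) (cs : List Nat) (val : Int)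
    (hread : ∀ a ∈ cs, PySem.List.pyGet? g (a : Int) = PySem.List.pyGet? h (a : Int)) :
    cntSmaller g cs val = cntSmaller h cs val := by
  induction cs with
  | nil => rfl
  | cons c rest ih =>
    simp only [cntSmaller]
    rw [hread c (by simp)]
    cases PySem.List.pyGet? h (c : Int) with
    | none => rfl
    | some v =>
      by_cases hlt : v < val
      · simp only [if_pos hlt]
        rw [ih (fun a ha => hread a (by simp [ha]))]
      · simp [hlt]

-- the first action of shiftDown at dest = p overwrites slot p, so a prior write there is absorbed
lemma shiftDown_set_dest (g : List Int) (p : Nat) (cs : List Nat) (val : Int)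
    (hne : ∀ a ∈ cs, a ≠ p) (hrange : ∀ a ∈ cs, a < g.length) :
    shiftDown (g.set p val) p cs val = shiftDown g p cs val := by
  cases cs with
  | nil => simp [shiftDown, List.set_set]
  | cons a rest =>
    have hap : a ≠ p := hne a (by simp)
    have har : a < g.length := hrange a (by simp)
    simp only [shiftDown, PySem.List.pyGet?_natCast]
    rw [List.getElem?_set_ne (by omega), List.getElem?_eq_getElem har]
    simp only [List.set_set]

-- main invariant: A's loop at index l (whose slot holds val) equals B's staged computation
lemma loopA_eq_staged (val : Int) :
    ∀ l h, l < List.length h → h[l]? = some val →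
      insertHeapLoopA h l
        = shiftDown h l ((chainIdx l).take (cntSmaller h (chainIdx l) val)) val := by
  intro l
  induction l using Nat.strong_induction_on with
  | _ l IH =>
    intro h hlen hval
    by_cases hl : 0 < l
    · have hp : (l - 1) / 2 < l := by omega
      have hplen : (l - 1) / 2 < h.length := by omega
      rw [insertHeapLoopA, floordiv_pred_half l hl]
      have hpneg : ¬ ((((l - 1) / 2 : Nat) : Int) < 0) := by omega
      rw [dif_neg hpneg]
      simp only [PySem.List.pyGet?_natCast, Int.toNat_natCast]
      have gp : h[(l - 1) / 2]? = some (h[(l - 1) / 2]'hplen) := List.getElem?_eq_getElem hplen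
      rw [gp, hval]
      rw [chainIdx, dif_pos hl]
      simp only [cntSmaller, PySem.List.pyGet?_natCast, gp]
      by_cases hlt : h[(l - 1) / 2]'hplen < val
      · simp only [if_pos hlt]
        -- A swaps: h' = (h.set ((l-1)/2) val).set l h[(l-1)/2]; recurse at (l-1)/2
        have hlen' : (l - 1) / 2 < ((h.set ((l - 1) / 2) val).set l (h[(l - 1) / 2]'hplen)).length := by
          simpa using hplen
        have hval' : ((h.set ((l - 1) / 2) val).set l (h[(l - 1) / 2]'hplen))[(l - 1) / 2]? = some val := by
          rw [List.getElem?_set_ne (by omega), List.getElem?_set_self]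
          simp [hplen]
        have hrec := IH ((l - 1) / 2) hp _ hlen' hval'
        rw [hrec]
        -- counts agree: chain of (l-1)/2 reads only indices below it, untouched by the two sets
        have hcnt : cntSmaller ((h.set ((l - 1) / 2) val).set l (h[(l - 1) / 2]'hplen)) (chainIdx ((l - 1) / 2)) val
            = cntSmaller h (chainIdx ((l - 1) / 2)) val := by
          apply cntSmaller_congr
          intro a ha
          have hap : a < (l - 1) / 2 := chainIdx_lt _ a ha
          simp only [PySem.List.pyGet?_natCast]
          rw [List.getElem?_set_ne (by omega), List.getElem?_set_ne (by omega)]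
        rw [hcnt]
        -- commute the two writes, then the write at the hole is absorbed by shiftDown
        have hcomm : (h.set ((l - 1) / 2) val).set l (h[(l - 1) / 2]'hplen)
            = (h.set l (h[(l - 1) / 2]'hplen)).set ((l - 1) / 2) val :=
          List.set_comm _ _ (by omega)
        rw [hcomm]
        rw [shiftDown_set_dest _ _ _ _
          (fun a ha => by have := chainIdx_lt _ a (List.mem_of_mem_take ha); omega)
          (fun a ha => by have := chainIdx_lt _ a (List.mem_of_mem_take ha); simp; omega)]
        -- unfold one step of shiftDown on the B side
        have hsucc : (1 + cntSmaller h (chainIdx ((l - 1) / 2)) val)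
            = Nat.succ (cntSmaller h (chainIdx ((l - 1) / 2)) val) := by omega
        rw [hsucc, List.take_succ_cons]
        simp only [shiftDown, PySem.List.pyGet?_natCast, gp]
      · simp only [if_neg hlt, List.take_zero, shiftDown]
        exact (set_eq_self_of_get h l val hval).symm
    · have h0 : l = 0 := by omega
      subst h0
      rw [insertHeapLoopA]
      simp only [Nat.cast_zero]
      rw [dif_pos (by decide)]
      rw [chainIdx, dif_neg (by omega)]
      simp only [List.take_nil, shiftDown]
      exact (set_eq_self_of_get h 0 val hval).symm

lemma get_last_append (h_ : List Int) (n : Int) : (h_ ++ [n])[h_.length]? = some n := by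
  rw [List.getElem?_append_right (by omega)]
  simp

-- ===== VERDICT (by name: the statement is the Claim_ definition above) =====
theorem insert_heap_spec : Claim_equal_insert_heap := by
  intro h_ number _
  show insert_heap h_ number = insert_heap_alt h_ number
  unfold insert_heap insert_heap_alt
  have hlen : (h_ ++ [number]).length - 1 = h_.length := by simp
  simp only [hlen]
  exact loopA_eq_staged number h_.length (h_ ++ [number]) (by simp) (get_last_append h_ number)
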